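-- pv_equiv track=rewrite | github.com/iblug/Baekjoon | 이코테/chapter11~18/11-6_muzi_mukbang_2.py | solution
-- ===== SOURCE A (Python) =====
-- def solution(food_times, k):
--     answer = 0
--     if sum(food_times) <= k:
--         answer = -1
--     else:
--         while k:
--             if food_times[answer] != 0:
--                 food_times[answer] -= 1
--                 k -= 1
--             answer = (answer + 1) % len(food_times)
--             if food_times[answer] == 0:
--                 answer = (answer + 1) % len(food_times)
--         answer += 1
--
--     return answer
-- ===== SOURCE B (Python) =====
-- def solution(food_times, k):
--     # Round-bulk re-implementation: instead of simulating second by second with a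
--     # moving pointer, consume whole round-robin rounds at a time over the list of
--     # foods that still have time left, then index the k-th position directly.
--     if sum(food_times) <= k:
--         return -1
--     ft = list(food_times)
--     alive = [i for i in range(len(ft)) if ft[i]]
--     while k >= len(alive):
--         k -= len(alive)
--         for i in alive:
--             ft[i] -= 1
--         alive = [i for i in range(len(ft)) if ft[i]]
--     return alive[k] + 1
-- ===== Notes on version B (the rewrite author's own statement) =====
-- stated objective: alternative
-- what changed: B replaces A's second-by-second pointer simulation (modulo stepping with an extra skip over one empty slot) by round-bulk processing: it keeps the list of foods with time left, subtracts one whole round-robin round from k at a time, and when k is smaller than a round it indexes the answer directly; Pre_ excludes only k<0 with sum(food_times)>k, where A loops forever.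
-- intended difference: On inputs where the food eaten at second k is followed cyclically by two or more already-exhausted foods (or k=0 with the first food's time 0), A returns the index of an exhausted food because its pointer skips at most one empty slot, while B returns the next food that still has time left, which is the intended answer (e.g. ([5,1,1,1],5): A=3 pointing at a finished food, B=1). — e.g. on solution([5, 1, 1, 1], 5): A returns 3, B returns 1
import Mathlib
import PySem

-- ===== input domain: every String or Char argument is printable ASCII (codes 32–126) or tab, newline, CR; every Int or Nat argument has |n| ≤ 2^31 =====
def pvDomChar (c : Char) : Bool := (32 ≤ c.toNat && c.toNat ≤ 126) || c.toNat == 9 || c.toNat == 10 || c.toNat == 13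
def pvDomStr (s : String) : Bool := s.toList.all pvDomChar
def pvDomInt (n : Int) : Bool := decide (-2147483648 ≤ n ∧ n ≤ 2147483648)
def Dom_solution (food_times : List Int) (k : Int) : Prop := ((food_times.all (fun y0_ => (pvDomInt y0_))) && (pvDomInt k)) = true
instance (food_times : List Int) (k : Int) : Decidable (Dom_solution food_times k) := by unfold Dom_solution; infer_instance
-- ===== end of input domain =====

-- B processes whole round-robin rounds in bulk over the list of still-unfinished foods instead of
-- simulating second by second (alternative decomposition; return values agree outside D_solution).
-- Python A mutates food_times in place (decrements entries); B does not — the equivalence proved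
-- here is about the RETURN value only.

-- ===== PORT A =====
-- literal port of A's while-loop; fuel is only a totality guard (the loop diverges for k < 0,
-- which Pre_solution excludes); none = fuel exhausted or IndexError (empty list), both outside Pre_.
def loopA : List Int → Int → Int → Nat → Option Int
  | _, _, _, 0 => none
  | ft, k, answer, fuel+1 =>
    if k = 0 then some answer
    else
      match PySem.List.pyGet? ft answer with
      | none => none   -- IndexError (only reachable for an empty list, outside Pre_)
      | some v =>
        let ft1 := if v ≠ 0 then ft.set answer.toNat (v - 1) else ft
        let k1 := if v ≠ 0 then k - 1 else k
        let a1 := PySem.Int.mod (answer + 1) (ft1.length : Int)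
        match PySem.List.pyGet? ft1 a1 with
        | none => none
        | some w =>
          let a2 := if w = 0 then PySem.Int.mod (a1 + 1) (ft1.length : Int) else a1
          loopA ft1 k1 a2 fuel

def solution (food_times : List Int) (k : Int) : Int :=
  if food_times.sum ≤ k then -1
  else
    match loopA food_times k 0 ((k.toNat + 2) * (food_times.length + 2)) with
    | some a => a + 1
    | none => 0   -- unreachable under Pre_solution (fuel bound proved below)

-- ===== PORT B =====
-- alive = [i for i in range(len(ft)) if ft[i]]
def aliveIdx (ft : List Int) : List Nat :=
  (List.range ft.length).filter (fun i => decide (ft.getD i 0 ≠ 0))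

-- for i in alive: ft[i] -= 1
def decFirst (ft : List Int) (idxs : List Nat) : List Int :=
  idxs.foldl (fun f i => f.set i (f.getD i 0 - 1)) ft

-- while k >= len(alive): … ; return alive[k] + 1   (fuel is only a totality guard; the loop
-- runs at most k+1 times since k drops by len(alive) ≥ 1 each round)
def loopB : List Int → Int → Nat → Option Int
  | _, _, 0 => none
  | ft, k, fuel+1 =>
    let alive := aliveIdx ft
    if (alive.length : Int) ≤ k then
      loopB (decFirst ft alive) (k - alive.length) fuel
    else
      (PySem.List.pyGet? alive k).map (fun a => (a : Int) + 1)

def solution_alt (food_times : List Int) (k : Int) : Int :=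
  if food_times.sum ≤ k then -1
  else
    match loopB food_times k (k.toNat + 2) with
    | some a => a
    | none => 0   -- unreachable under Pre_solution

-- ===== PRECONDITION & SPEC =====
-- Pre_ excludes exactly the inputs where A does not return: for k < 0 with sum(food_times) > k the
-- while-loop never terminates (k only ever decreases) or, on the empty list, raises IndexError.
def Pre_solution (food_times : List Int) (k : Int) : Prop := 0 ≤ k ∨ food_times.sum ≤ k
instance (food_times : List Int) (k : Int) : Decidable (Pre_solution food_times k) := by
  unfold Pre_solution; infer_instance

def pvWitness_solution : List Int × Int := ([3, 1, 2], 5)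

-- D_solution is stated via an independent per-second specification of round-robin eating,
-- not via either port: keep the plates in cyclic order starting just after the last bite;
-- each second rotate the finished plates to the back, eat 1 from the first unfinished plate,
-- and rotate it to the back; r's first two plates are the two just after the k-th bite.
def D_solution (food_times : List Int) (k : Int) : Prop :=
  k < food_times.sum ∧
    (let r := (fun l => match l.span (· == 0) with
          | (z, x :: t) => t ++ z ++ [x - 1]
          | _ => [])^[k.toNat] food_times
     r.head? = some 0 ∧ (k = 0 ∨ (r.tail ++ r).head? = some 0))
instance (food_times : List Int) (k : Int) : Decidable (D_solution food_times k) := by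
  unfold D_solution; infer_instance

def Spec_solution (food_times : List Int) (k : Int) (out : Int) : Prop :=
  ¬ D_solution food_times k → out = solution_alt food_times k
instance (food_times : List Int) (k : Int) (out : Int) : Decidable (Spec_solution food_times k out) := by
  unfold Spec_solution; infer_instance

def pvDiffWitness_solution : List Int × Int := ([5, 1, 1, 1], 5)
def pvDiffWitnessOut_solution : Int × Int := (3, 1)

-- ===== CLAIM (what is proved, stated in full; the proofs are below) =====
def Claim_unchanged_solution : Prop := ∀ (food_times : List Int) (k : Int), Dom_solution food_times k → Pre_solution food_times k → Spec_solution food_times k (solution food_times k)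
def Claim_changed_solution : Prop := Dom_solution (pvDiffWitness_solution.1) (pvDiffWitness_solution.2) ∧ Pre_solution (pvDiffWitness_solution.1) (pvDiffWitness_solution.2) ∧ D_solution (pvDiffWitness_solution.1) (pvDiffWitness_solution.2) ∧ solution (pvDiffWitness_solution.1) (pvDiffWitness_solution.2) = pvDiffWitnessOut_solution.1 ∧ solution_alt (pvDiffWitness_solution.1) (pvDiffWitness_solution.2) = pvDiffWitnessOut_solution.2 ∧ pvDiffWitnessOut_solution.1 ≠ pvDiffWitnessOut_solution.2
def Claim_exact_solution : Prop := ∀ (food_times : List Int) (k : Int), Dom_solution food_times k → Pre_solution food_times k → D_solution food_times k → solution food_times k ≠ solution_alt food_times k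

-- ===== LEMMAS AND PROOFS =====

def getI (ft : List Int) (i : Nat) : Int := ft.getD i 0

-- proof-side formulation of the per-second specification (bridged to nxt/simSec below)
def distAux (ft : List Int) : Nat → Nat → Nat
  | 0, _ => 0
  | m+1, a => if getI ft a ≠ 0 then 0 else distAux ft m ((a + 1) % ft.length) + 1

-- cyclic distance from a to the first food with time left
def cdist (ft : List Int) (a : Nat) : Nat := distAux ft ft.length a

-- index of the first food at or cyclically after p whose remaining time is not 0
def nextIdx (S : List Int) (p : Nat) : Nat := (p + cdist S p) % S.length

def simLoop : List Int → Nat → Nat → List Int × Nat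
  | S, p, 0 => (S, p)
  | S, p, m+1 =>
    simLoop (S.set (nextIdx S p) (getI S (nextIdx S p) - 1)) ((nextIdx S p + 1) % S.length) m

-- one iteration of A's while-loop, with the pointer as a Nat
def stepFt (ft : List Int) (a : Nat) : List Int :=
  if getI ft a ≠ 0 then ft.set a (getI ft a - 1) else ft
def stepK (ft : List Int) (k : Int) (a : Nat) : Int :=
  if getI ft a ≠ 0 then k - 1 else k
def stepPtr (ft : List Int) (a : Nat) : Nat :=
  if getI (stepFt ft a) ((a + 1) % ft.length) = 0
  then ((a + 1) % ft.length + 1) % ft.length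
  else (a + 1) % ft.length

-- Nat-pointer version of loopA (proved equal to loopA below)
def loopS : List Int → Int → Nat → Nat → Option Nat
  | _, _, _, 0 => none
  | ft, k, a, fuel+1 =>
    if k = 0 then some a else loopS (stepFt ft a) (stepK ft k a) (stepPtr ft a) fuel

-- convergence predicate: the loop, started in this state, terminates with result r
def CC (ft : List Int) (k : Int) (a : Nat) (r : Nat) : Prop := ∃ f, loopS ft k a f = some r

-- alive indices of the segment [a, length)
def segAlive (ft : List Int) (a : Nat) : List Nat :=
  (List.range' a (ft.length - a)).filter (fun i => decide (getI ft i ≠ 0))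

-- A's exit step: advance past at most one empty slot
def afin : List Int × Nat → Nat :=
  fun Ss => if getI Ss.1 Ss.2 = 0 then (Ss.2 + 1) % Ss.1.length else Ss.2

-- the old-style finish used to phrase the segment lemma
def finishB (ft : List Int) (p : Nat) : Nat :=
  let a := (p + 1) % ft.length
  if ft.getD a 0 = 0 then (a + 1) % ft.length else a

-- basic lemmas ---------------------------------------------------------------

theorem length_stepFt (ft : List Int) (a : Nat) : (stepFt ft a).length = ft.length := by
  unfold stepFt; split <;> simp

theorem getI_set_ne (ft : List Int) (i j : Nat) (v : Int) (h : i ≠ j) :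
    getI (ft.set i v) j = getI ft j := by
  simp [getI, List.getD, List.getElem?_set_ne h]

theorem sum_set_getI (ft : List Int) (i : Nat) (v : Int) (h : i < ft.length) :
    (ft.set i v).sum = ft.sum - getI ft i + v := by
  induction ft generalizing i with
  | nil => simp at h
  | cons x xs ih =>
    cases i with
    | zero => simp [getI]; ring
    | succ i =>
      simp only [List.set_cons_succ, List.sum_cons, getI, List.getD_cons_succ]
      rw [ih (i := i) (by simpa using h)]
      unfold getI
      ring

theorem exists_nonzero_of_sum_ne_zero (ft : List Int) (h : ft.sum ≠ 0) :
    ∃ c, c < ft.length ∧ getI ft c ≠ 0 := by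
  induction ft with
  | nil => simp at h
  | cons x xs ih =>
    by_cases hx : x = 0
    · subst hx
      simp only [List.sum_cons, zero_add] at h
      obtain ⟨c, hc, hne⟩ := ih h
      exact ⟨c + 1, by simpa using hc, by simpa [getI] using hne⟩
    · exact ⟨0, by simp, by simpa [getI] using hx⟩

theorem loopS_mono (f f' : Nat) (hle : f ≤ f') :
    ∀ ft k a r, loopS ft k a f = some r → loopS ft k a f' = some r := by
  induction f generalizing f' with
  | zero => intro ft k a r h; simp [loopS] at h
  | succ f ih =>
    intro ft k a r h
    obtain ⟨f'', rfl⟩ : ∃ f'', f' = f'' + 1 := ⟨f' - 1, by omega⟩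
    rw [loopS] at h ⊢
    by_cases hk : k = 0
    · simpa [hk] using h
    · simp only [hk, if_false] at h ⊢
      exact ih f'' (by omega) _ _ _ _ h

theorem CC_det (ft : List Int) (k : Int) (a : Nat) (r r' : Nat)
    (h : CC ft k a r) (h' : CC ft k a r') : r = r' := by
  obtain ⟨f, hf⟩ := h
  obtain ⟨f', hf'⟩ := h'
  rcases Nat.le_total f f' with hle | hle
  · have := loopS_mono f f' hle ft k a r hf
    rw [this] at hf'; exact (Option.some.injEq ..).mp hf' |>.symm ▸ rfl
  · have := loopS_mono f' f hle ft k a r' hf'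
    rw [this] at hf; exact ((Option.some.injEq ..).mp hf).symm ▸ rfl

theorem CC_zero (ft : List Int) (a : Nat) : CC ft 0 a a := ⟨1, by simp [loopS]⟩

theorem CC_step (ft : List Int) (k : Int) (a : Nat) (r : Nat) (hk : k ≠ 0) :
    CC ft k a r ↔ CC (stepFt ft a) (stepK ft k a) (stepPtr ft a) r := by
  constructor
  · rintro ⟨f, hf⟩
    match f, hf with
    | 0, hf => simp [loopS] at hf
    | g+1, hf => exact ⟨g, by simpa [loopS, hk] using hf⟩
  · rintro ⟨f, hf⟩
    exact ⟨f + 1, by simpa [loopS, hk] using hf⟩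

-- dist lemmas ----------------------------------------------------------------

theorem distAux_le (ft : List Int) (m a : Nat) : distAux ft m a ≤ m := by
  induction m generalizing a with
  | zero => simp [distAux]
  | succ m ih => unfold distAux; split; · omega
                 · have := ih ((a + 1) % ft.length); omega

theorem cdist_le (ft : List Int) (a : Nat) : cdist ft a ≤ ft.length := distAux_le ..

theorem distAux_congr (ft : List Int) :
    ∀ m m' a, a < ft.length →
      (∃ j, j < m ∧ j < m' ∧ getI ft ((a + j) % ft.length) ≠ 0) →
      distAux ft m a = distAux ft m' a := by
  intro m
  induction m with
  | zero => intro m' a _ h; obtain ⟨j, hj, _, _⟩ := h; omega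
  | succ m ih =>
    intro m' a ha h
    obtain ⟨j, hj, hj', hnz⟩ := h
    obtain ⟨m'', rfl⟩ : ∃ m'', m' = m'' + 1 := ⟨m' - 1, by omega⟩
    rw [distAux, distAux]
    split
    · rfl
    · rename_i h0
      rw [not_not] at h0
      have hj1 : 1 ≤ j := by
        rcases Nat.eq_zero_or_pos j with rfl | h1
        · rw [Nat.add_zero, Nat.mod_eq_of_lt ha] at hnz; exact absurd h0 hnz
        · exact h1
      have ih' := ih (m'') ((a + 1) % ft.length) (Nat.mod_lt _ (by omega)) ?_
      · rw [ih']
      · refine ⟨j - 1, by omega, by omega, ?_⟩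
        have : ((a + 1) % ft.length + (j - 1)) % ft.length = (a + j) % ft.length := by
          rw [Nat.mod_add_mod]
          congr 1
          omega
        rw [this]
        exact hnz

theorem cdist_shift (ft : List Int) (a : Nat) (ha : a < ft.length) (h0 : getI ft a = 0)
    (hex : ∃ c, c < ft.length ∧ getI ft c ≠ 0) :
    cdist ft a = cdist ft ((a + 1) % ft.length) + 1 := by
  obtain ⟨c, hc, hcnz⟩ := hex
  have hn : 0 < ft.length := by omega
  obtain ⟨m, hm⟩ : ∃ m, ft.length = m + 1 := ⟨ft.length - 1, by omega⟩
  have hb : (a + 1) % ft.length < ft.length := Nat.mod_lt _ hn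
  have h1 : cdist ft a = distAux ft m ((a + 1) % ft.length) + 1 := by
    rw [cdist, hm, distAux, ← hm]
    simp [h0]
  rw [h1, cdist]
  congr 1
  apply distAux_congr ft m ft.length ((a + 1) % ft.length) hb
  set n := ft.length with hnn
  set b := (a + 1) % n with hbb
  have hbn : b < n := hb
  have hbc : (b + (c + n - b) % n) % n = c := by
    rw [Nat.add_mod_mod]
    have he : b + (c + n - b) = c + n := by omega
    rw [he, Nat.add_mod_right, Nat.mod_eq_of_lt hc]
  refine ⟨(c + n - b) % n, ?_, Nat.mod_lt _ hn, by rw [hbc]; exact hcnz⟩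
  have hlt : (c + n - b) % n < n := Nat.mod_lt _ hn
  rcases Nat.lt_or_ge ((c + n - b) % n) m with h | h
  · exact h
  · exfalso
    have hev : (c + n - b) % n = m := by omega
    rw [hev] at hbc
    have hba : (b + m) % n = a := by
      rw [hbb, Nat.mod_add_mod]
      have he2 : a + 1 + m = a + n := by omega
      rw [he2, Nat.add_mod_right, Nat.mod_eq_of_lt ha]
    rw [hba] at hbc
    exact hcnz (hbc ▸ h0)

theorem cdist_zero (ft : List Int) (a : Nat) (hn : 0 < ft.length) (h : getI ft a ≠ 0) :
    cdist ft a = 0 := by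
  obtain ⟨m, hm⟩ : ∃ m, ft.length = m + 1 := ⟨ft.length - 1, by omega⟩
  rw [cdist, hm, distAux]
  simp [h]

theorem nextIdx_self (ft : List Int) (a : Nat) (ha : a < ft.length) (h : getI ft a ≠ 0) :
    nextIdx ft a = a := by
  rw [nextIdx, cdist_zero ft a (by omega) h, Nat.add_zero, Nat.mod_eq_of_lt ha]

theorem nextIdx_shift (ft : List Int) (a : Nat) (ha : a < ft.length) (h0 : getI ft a = 0)
    (hex : ∃ c, c < ft.length ∧ getI ft c ≠ 0) :
    nextIdx ft a = nextIdx ft ((a + 1) % ft.length) := by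
  rw [nextIdx, nextIdx, cdist_shift ft a ha h0 hex]
  rw [Nat.mod_add_mod]
  congr 1
  omega

theorem nextIdx_alive (ft : List Int) : ∀ (d a : Nat), cdist ft a = d → a < ft.length →
    (∃ c, c < ft.length ∧ getI ft c ≠ 0) → getI ft (nextIdx ft a) ≠ 0 := by
  intro d
  induction d using Nat.strong_induction_on with
  | _ d ih =>
    intro a hd ha hex
    by_cases h : getI ft a ≠ 0
    · rw [nextIdx_self ft a ha h]; exact h
    · rw [not_not] at h
      have hs := cdist_shift ft a ha h hex
      rw [nextIdx_shift ft a ha h hex]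
      exact ih (cdist ft ((a + 1) % ft.length)) (by omega) _ rfl
        (Nat.mod_lt _ (by omega)) hex

-- simLoop basics --------------------------------------------------------------

theorem simLoop_length (m : Nat) : ∀ (S : List Int) (p : Nat),
    (simLoop S p m).1.length = S.length := by
  induction m with
  | zero => intro S p; rfl
  | succ m ih => intro S p; rw [simLoop, ih]; simp

theorem simLoop_snd_lt (m : Nat) : ∀ (S : List Int) (p : Nat), 0 < S.length →
    p < S.length → (simLoop S p m).2 < S.length := by
  induction m with
  | zero => intro S p _ hp; exact hp
  | succ m ih =>
    intro S p hn hp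
    rw [simLoop]
    have h := ih (S.set (nextIdx S p) (getI S (nextIdx S p) - 1))
      ((nextIdx S p + 1) % S.length) (by simpa using hn) (by simp; exact Nat.mod_lt _ hn)
    simpa using h

theorem simLoop_split (m2 : Nat) : ∀ (m1 : Nat) (S : List Int) (p : Nat),
    simLoop S p (m1 + m2) = simLoop (simLoop S p m1).1 (simLoop S p m1).2 m2 := by
  intro m1
  induction m1 with
  | zero => intro S p; simp [simLoop]
  | succ m1 ih =>
    intro S p
    have h : m1 + 1 + m2 = (m1 + m2) + 1 := by omega
    rw [h, simLoop, simLoop, ih]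

theorem simLoop_sum (m : Nat) : ∀ (S : List Int) (p : Nat), p < S.length →
    (m : Int) < S.sum → (simLoop S p m).1.sum = S.sum - m := by
  induction m with
  | zero => intro S p _ _; simp [simLoop]
  | succ m ih =>
    intro S p hp hm
    have hn : 0 < S.length := by omega
    have hex : ∃ c, c < S.length ∧ getI S c ≠ 0 := by
      apply exists_nonzero_of_sum_ne_zero
      have : (0 : Int) ≤ m := by positivity
      omega
    have hq : getI S (nextIdx S p) ≠ 0 := nextIdx_alive S (cdist S p) p rfl hp hex
    have hqlt : nextIdx S p < S.length := Nat.mod_lt _ hn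
    rw [simLoop]
    rw [ih _ _ (by simp; exact Nat.mod_lt _ hn) ?_]
    · rw [sum_set_getI S _ _ hqlt]
      push_cast
      ring
    · rw [sum_set_getI S _ _ hqlt]
      push_cast at hm ⊢
      omega

-- bridging the compact D_-side rotation simulation to the pointer simulation -----

def rot : List Int → Nat → List Int
  | l, 0 => l
  | l, m+1 =>
    rot (match l.span (· == 0) with
         | (z, x :: r) => r ++ z ++ [x - 1]
         | (_, []) => []) m

def rstep (l : List Int) : List Int :=
  match l.span (· == 0) with
  | (z, x :: r) => r ++ z ++ [x - 1]
  | (_, []) => []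

theorem rot_succ (l : List Int) (m : Nat) : rot l (m + 1) = rot (rstep l) m := rfl

def rotAt (S : List Int) (p : Nat) : List Int := S.drop p ++ S.take p

theorem rstep_of_dropWhile (l : List Int) (x : Int) (r : List Int)
    (h : l.dropWhile (· == 0) = x :: r) :
    rstep l = r ++ l.takeWhile (· == 0) ++ [x - 1] := by
  rw [rstep, List.span_eq_takeWhile_dropWhile, h]

theorem rotAt_zero (S : List Int) : rotAt S 0 = S := by simp [rotAt]

theorem rotAt_cons (S : List Int) (p : Nat) (hp : p < S.length) :
    rotAt S p = getI S p :: (S.drop (p + 1) ++ S.take p) := by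
  rw [rotAt, List.drop_eq_getElem_cons hp, getI, List.getD_eq_getElem _ _ hp, List.cons_append]

theorem rotAt_succ_eq (S : List Int) (p : Nat) (hp : p < S.length) :
    rotAt S ((p + 1) % S.length) = (S.drop (p + 1) ++ S.take p) ++ [getI S p] := by
  have hg : getI S p = S[p] := by rw [getI, List.getD_eq_getElem _ _ hp]
  rcases Nat.lt_or_ge (p + 1) S.length with h1 | h1
  · rw [Nat.mod_eq_of_lt h1, rotAt, List.take_succ_eq_append_getElem hp, hg, List.append_assoc]
  · have hpe : p + 1 = S.length := by omega
    have hd : S.drop (p + 1) = [] := by rw [List.drop_eq_nil_iff]; omega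
    rw [hg, hd, List.nil_append,
        show S.take p ++ [S[p]] = S.take (p + 1) from (List.take_succ_eq_append_getElem hp).symm,
        hpe, Nat.mod_self, rotAt_zero, List.take_length]

theorem getI_set_self (ft : List Int) (i : Nat) (v : Int) (h : i < ft.length) :
    getI (ft.set i v) i = v := by
  simp [getI, List.getD, h]

theorem drop_set_gt (S : List Int) (i j : Nat) (v : Int) (h : i < j) :
    (S.set i v).drop j = S.drop j := by
  rw [List.drop_set]
  simp [h]

theorem take_set_ge (S : List Int) (i j : Nat) (v : Int) (h : j ≤ i) :
    (S.set i v).take j = S.take j := by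
  apply List.ext_getElem
  · simp
  · intro m hm hm2
    simp only [List.getElem_take, List.length_take, List.length_set] at hm ⊢
    rw [List.getElem_set_ne (by omega)]

theorem rstep_rotAt_alive (S : List Int) (p : Nat) (hp : p < S.length)
    (hnz : getI S p ≠ 0) :
    rstep (rotAt S p) = rotAt (S.set p (getI S p - 1)) ((p + 1) % S.length) := by
  have hcons := rotAt_cons S p hp
  have hbeq : (getI S p == 0) = false := by simpa using hnz
  have hdw : (rotAt S p).dropWhile (· == 0)
      = getI S p :: (S.drop (p + 1) ++ S.take p) := by
    rw [hcons, List.dropWhile_cons_of_neg (by simp [hbeq])]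
  have htw : (rotAt S p).takeWhile (· == 0) = [] := by
    rw [hcons, List.takeWhile_cons_of_neg (by simp [hbeq])]
  rw [rstep_of_dropWhile _ _ _ hdw, htw]
  have hlen : (S.set p (getI S p - 1)).length = S.length := by simp
  have hmod : (p + 1) % S.length = (p + 1) % (S.set p (getI S p - 1)).length := by rw [hlen]
  rw [hmod, rotAt_succ_eq (S.set p (getI S p - 1)) p (by rw [hlen]; exact hp)]
  rw [getI_set_self S p _ hp, drop_set_gt S p (p + 1) _ (by omega),
      take_set_ge S p p _ (le_refl _)]
  simp

theorem rstep_zero_swap (l : List Int) (hex : ∃ x ∈ l, x ≠ 0) :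
    rstep ((0 : Int) :: l) = rstep (l ++ [0]) := by
  have hdwne : l.dropWhile (· == 0) ≠ [] := by
    rw [Ne, List.dropWhile_eq_nil_iff]
    push_neg
    obtain ⟨x, hx, hnz⟩ := hex
    exact ⟨x, hx, by simpa using hnz⟩
  obtain ⟨x, r, hxr⟩ : ∃ x r, l.dropWhile (· == 0) = x :: r := by
    rcases h : l.dropWhile (· == 0) with _ | ⟨x, r⟩
    · exact absurd h hdwne
    · exact ⟨x, r, rfl⟩
  have hdw1 : ((0 : Int) :: l).dropWhile (· == 0) = x :: r := by
    rw [List.dropWhile_cons_of_pos (by simp), hxr]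
  have hdw2 : (l ++ [(0 : Int)]).dropWhile (· == 0) = x :: (r ++ [0]) := by
    rw [List.dropWhile_append, hxr]
    simp
  rw [rstep_of_dropWhile _ _ _ hdw1, rstep_of_dropWhile _ _ _ hdw2]
  have htw1 : ((0 : Int) :: l).takeWhile (· == 0) = 0 :: l.takeWhile (· == 0) := by
    rw [List.takeWhile_cons_of_pos (by simp)]
  have htw2 : (l ++ [(0 : Int)]).takeWhile (· == 0) = l.takeWhile (· == 0) := by
    have hlensum : (l.takeWhile (· == 0)).length + (l.dropWhile (· == 0)).length = l.length := by
      conv_rhs => rw [← List.takeWhile_append_dropWhile (p := (· == (0 : Int))) (l := l)]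
      rw [List.length_append]
    have hne : ¬ (l.takeWhile (· == 0)).length = l.length := by
      rw [hxr] at hlensum
      simp only [List.length_cons] at hlensum
      omega
    rw [List.takeWhile_append, if_neg hne]
  rw [htw1, htw2]
  simp

theorem mem_rotAt_of_ne (S : List Int) (p c : Nat) (hp : p < S.length) (hc : c < S.length)
    (hcnz : getI S c ≠ 0) (h0 : getI S p = 0) :
    ∃ x ∈ S.drop (p + 1) ++ S.take p, x ≠ 0 := by
  have hperm : (rotAt S p).Perm S := by
    rw [rotAt]
    exact List.Perm.trans List.perm_append_comm (by rw [List.take_append_drop])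
  have hmem : getI S c ∈ S := by
    rw [getI, List.getD_eq_getElem _ _ hc]
    exact List.getElem_mem hc
  have hmem2 : getI S c ∈ rotAt S p := hperm.mem_iff.mpr hmem
  rw [rotAt_cons S p hp, h0] at hmem2
  rcases List.mem_cons.mp hmem2 with h | h
  · exact absurd h hcnz
  · exact ⟨getI S c, h, hcnz⟩

theorem rstep_rotAt : ∀ (d : Nat) (S : List Int) (p : Nat), cdist S p = d → p < S.length →
    (∃ c, c < S.length ∧ getI S c ≠ 0) →
    rstep (rotAt S p)
      = rotAt (S.set (nextIdx S p) (getI S (nextIdx S p) - 1)) ((nextIdx S p + 1) % S.length) := by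
  intro d
  induction d using Nat.strong_induction_on with
  | _ d ih =>
    intro S p hd hp hex
    by_cases h0 : getI S p = 0
    · obtain ⟨c, hc, hcnz⟩ := hex
      have hex2 := mem_rotAt_of_ne S p c hp hc hcnz h0
      have h1 : rotAt S p = (0 : Int) :: (S.drop (p + 1) ++ S.take p) := by
        rw [rotAt_cons S p hp, h0]
      have h2 : (S.drop (p + 1) ++ S.take p) ++ [(0 : Int)] = rotAt S ((p + 1) % S.length) := by
        rw [rotAt_succ_eq S p hp, h0]
      rw [h1, rstep_zero_swap _ hex2, h2]
      have hsh := cdist_shift S p hp h0 ⟨c, hc, hcnz⟩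
      have hres := ih (cdist S ((p + 1) % S.length)) (by omega) S ((p + 1) % S.length) rfl
        (Nat.mod_lt _ (by omega)) ⟨c, hc, hcnz⟩
      rw [hres, nextIdx_shift S p hp h0 ⟨c, hc, hcnz⟩]
    · rw [nextIdx_self S p hp h0]
      exact rstep_rotAt_alive S p hp h0

theorem rot_eq_simLoop : ∀ (m : Nat) (S : List Int) (p : Nat), p < S.length →
    (m : Int) < S.sum →
    rot (rotAt S p) m = rotAt (simLoop S p m).1 (simLoop S p m).2 := by
  intro m
  induction m with
  | zero => intro S p _ _; rfl
  | succ m ih =>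
    intro S p hp hm
    have hn : 0 < S.length := by omega
    have hsum0 : S.sum ≠ 0 := by
      intro hc
      rw [hc] at hm
      have : (0 : Int) ≤ m := by positivity
      omega
    have hex : ∃ c, c < S.length ∧ getI S c ≠ 0 := exists_nonzero_of_sum_ne_zero S hsum0
    rw [rot_succ, rstep_rotAt (cdist S p) S p rfl hp hex]
    have hq : getI S (nextIdx S p) ≠ 0 := nextIdx_alive S (cdist S p) p rfl hp hex
    have hqlt : nextIdx S p < S.length := Nat.mod_lt _ hn
    have hsum' : (S.set (nextIdx S p) (getI S (nextIdx S p) - 1)).sum = S.sum - 1 := by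
      rw [sum_set_getI S _ _ hqlt]; ring
    have hstep : simLoop S p (m + 1)
        = simLoop (S.set (nextIdx S p) (getI S (nextIdx S p) - 1))
            ((nextIdx S p + 1) % S.length) m := rfl
    rw [hstep]
    apply ih
    · simp only [List.length_set]
      exact Nat.mod_lt _ hn
    · rw [hsum']
      push_cast at hm ⊢
      omega

theorem step_eq_rstep (l : List Int) :
    (match l.span (· == 0) with
     | (z, x :: t) => t ++ z ++ [x - 1]
     | _ => []) = rstep l := by
  rw [rstep]
  rcases hsp : l.span (· == 0) with ⟨z, d⟩
  cases d <;> rfl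

theorem foldl_rot : ∀ (m : Nat) (S : List Int),
    (fun l => match l.span (· == 0) with
      | (z, x :: t) => t ++ z ++ [x - 1]
      | _ => [])^[m] S = rot S m := by
  intro m
  induction m with
  | zero => intro S; rfl
  | succ m ih =>
    intro S
    rw [Function.iterate_succ_apply, ih]
    show rot (match S.span (· == 0) with
      | (z, x :: t) => t ++ z ++ [x - 1]
      | _ => []) m = rot S (m + 1)
    rw [step_eq_rstep, ← rot_succ]

theorem rot_head (ft : List Int) (k : Int) (hk0 : 0 ≤ k) (hks : k < ft.sum) :
    (rot ft k.toNat).head?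
      = some (getI (simLoop ft 0 k.toNat).1 (simLoop ft 0 k.toNat).2) := by
  have hn : 0 < ft.length := by
    rcases ft with _ | ⟨x, xs⟩
    · exfalso; simp at hks; omega
    · simp
  rw [show rot ft k.toNat = rot (rotAt ft 0) k.toNat by rw [rotAt_zero],
      rot_eq_simLoop k.toNat ft 0 hn (by omega)]
  have hTlen : (simLoop ft 0 k.toNat).1.length = ft.length := simLoop_length k.toNat ft 0
  have hslt : (simLoop ft 0 k.toNat).2 < (simLoop ft 0 k.toNat).1.length := by
    rw [hTlen]; exact simLoop_snd_lt k.toNat ft 0 hn hn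
  rw [rotAt_cons _ _ hslt]
  rfl

theorem rotAt_getD_one (S : List Int) (p : Nat) (hp : p < S.length) :
    (rotAt S p ++ rotAt S p).getD 1 0 = getI S ((p + 1) % S.length) := by
  rcases Nat.lt_or_ge (p + 1) S.length with h1 | h1
  · have hg : getI S (p + 1) = S[p + 1] := by rw [getI, List.getD_eq_getElem _ _ h1]
    rw [Nat.mod_eq_of_lt h1, rotAt_cons S p hp, List.drop_eq_getElem_cons h1, hg]
    simp [List.cons_append, List.getD_cons_succ, List.getD_cons_zero, List.append_assoc]
    rw [List.getElem_append_left (by rw [List.length_drop]; omega), List.getElem_drop]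
  · have hpe : p + 1 = S.length := by omega
    have hmod : (p + 1) % S.length = 0 := by rw [hpe, Nat.mod_self]
    have hdnil : S.drop (p + 1) = [] := by rw [List.drop_eq_nil_iff]; omega
    rcases Nat.eq_zero_or_pos p with rfl | hp1
    · -- a single plate
      have hS : S = [getI S 0] := by
        rcases S with _ | ⟨x, xs⟩
        · simp at hp
        · have hxs : xs = [] := by
            have hx0 : xs.length = 0 := by
              simp only [List.length_cons] at hpe
              omega
            exact List.eq_nil_of_length_eq_zero hx0
          subst hxs
          rfl
      rw [hmod]
      conv_lhs => rw [hS]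
      rfl
    · -- p ≥ 1: the second element of the rotation is the first plate
      obtain ⟨x, xs, rfl⟩ : ∃ x xs, S = x :: xs := by
        rcases S with _ | ⟨x, xs⟩
        · simp at hp
        · exact ⟨x, xs, rfl⟩
      have htake : (x :: xs).take p = x :: xs.take (p - 1) := by
        obtain ⟨p', rfl⟩ : ∃ p', p = p' + 1 := ⟨p - 1, by omega⟩
        simp
      rw [hmod, rotAt_cons _ _ hp, hdnil, List.nil_append, htake]
      rfl

theorem rot_tail_head (ft : List Int) (k : Int) (hk0 : 0 ≤ k) (hks : k < ft.sum) :
    ((rot ft k.toNat).tail ++ rot ft k.toNat).head?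
      = some (getI (simLoop ft 0 k.toNat).1
          (((simLoop ft 0 k.toNat).2 + 1) % ft.length)) := by
  have hn : 0 < ft.length := by
    rcases ft with _ | ⟨x, xs⟩
    · exfalso; simp at hks; omega
    · simp
  have hTlen : (simLoop ft 0 k.toNat).1.length = ft.length := simLoop_length k.toNat ft 0
  have hslt : (simLoop ft 0 k.toNat).2 < (simLoop ft 0 k.toNat).1.length := by
    rw [hTlen]; exact simLoop_snd_lt k.toNat ft 0 hn hn
  have hrw : rot ft k.toNat
      = rotAt (simLoop ft 0 k.toNat).1 (simLoop ft 0 k.toNat).2 := by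
    rw [show rot ft k.toNat = rot (rotAt ft 0) k.toNat by rw [rotAt_zero],
        rot_eq_simLoop k.toNat ft 0 hn (by omega)]
  have h1 := rotAt_getD_one (simLoop ft 0 k.toNat).1 (simLoop ft 0 k.toNat).2 hslt
  rw [hTlen] at h1
  rw [rotAt_cons _ _ hslt] at h1 hrw
  rw [hrw]
  simp only [List.tail_cons, List.cons_append, List.getD_cons_succ] at h1 ⊢
  generalize (simLoop ft 0 k.toNat).1.drop ((simLoop ft 0 k.toNat).2 + 1)
      ++ (simLoop ft 0 k.toNat).1.take (simLoop ft 0 k.toNat).2 = L at h1 ⊢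
  cases L with
  | nil =>
    simp only [List.nil_append, List.getD_cons_zero] at h1
    simp only [List.nil_append, List.head?_cons]
    rw [h1]
  | cons a u =>
    rw [List.cons_append, List.getD_cons_zero] at h1
    rw [List.cons_append, List.head?_cons, h1]

-- segAlive plumbing -----------------------------------------------------------

theorem segAlive_cons (ft : List Int) (a : Nat) (ha : a < ft.length) :
    segAlive ft a = if getI ft a = 0 then segAlive ft (a + 1)
                    else a :: segAlive ft (a + 1) := by
  unfold segAlive
  have h1 : ft.length - a = (ft.length - (a + 1)) + 1 := by omega
  rw [h1, List.range'_succ, List.filter_cons]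
  by_cases h : getI ft a = 0 <;> simp [h]

theorem segAlive_nil (ft : List Int) : segAlive ft ft.length = [] := by
  simp [segAlive]

theorem segAlive_nil_of_le (ft : List Int) (a : Nat) (h : ft.length ≤ a) :
    segAlive ft a = [] := by
  unfold segAlive
  have : ft.length - a = 0 := by omega
  simp [this]

theorem segAlive_set_lt (ft : List Int) (a b : Nat) (v : Int) (h : b < a) :
    segAlive (ft.set b v) a = segAlive ft a := by
  unfold segAlive
  rw [List.length_set]
  apply List.filter_congr
  intro i hi
  rw [List.mem_range'_1] at hi
  simp only [decide_eq_decide]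
  rw [getI_set_ne ft b i v (by omega)]

theorem length_decFirst (ft : List Int) (L : List Nat) :
    (decFirst ft L).length = ft.length := by
  induction L generalizing ft with
  | nil => rfl
  | cons i L ih => simp [decFirst, List.foldl_cons] at *; rw [ih]; simp

theorem decFirst_cons (ft : List Int) (i : Nat) (L : List Nat) :
    decFirst ft (i :: L) = decFirst (ft.set i (getI ft i - 1)) L := rfl

theorem sum_decFirst (ft : List Int) (L : List Nat) (h : ∀ i ∈ L, i < ft.length) :
    (decFirst ft L).sum = ft.sum - L.length := by
  induction L generalizing ft with
  | nil => simp [decFirst]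
  | cons i L ih =>
    rw [decFirst_cons, ih _ (by intro j hj; rw [List.length_set]; exact h j (by simp [hj])),
        sum_set_getI ft i _ (h i (by simp))]
    simp only [List.length_cons]
    push_cast
    ring

theorem getI_decFirst_not_mem (ft : List Int) (L : List Nat) (j : Nat) (h : j ∉ L) :
    getI (decFirst ft L) j = getI ft j := by
  induction L generalizing ft with
  | nil => rfl
  | cons i L ih =>
    rw [decFirst_cons, ih _ (by intro hm; exact h (by simp [hm])),
        getI_set_ne ft i j _ (by intro he; exact h (by simp [he]))]

theorem segAlive_decFirst_lt (ft : List Int) (L : List Nat) (a : Nat)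
    (h : ∀ x ∈ L, x < a) : segAlive (decFirst ft L) a = segAlive ft a := by
  induction L generalizing ft with
  | nil => rfl
  | cons i L ih =>
    rw [decFirst_cons, ih _ (by intro x hx; exact h x (by simp [hx])),
        segAlive_set_lt ft a i _ (h i (by simp))]

theorem aliveIdx_eq_segAlive (ft : List Int) : aliveIdx ft = segAlive ft 0 := by
  simp [aliveIdx, segAlive, List.range_eq_range', getI]

theorem mem_aliveIdx (ft : List Int) (j : Nat) :
    j ∈ aliveIdx ft ↔ j < ft.length ∧ getI ft j ≠ 0 := by
  simp [aliveIdx, List.mem_filter, List.mem_range, getI]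

theorem aliveIdx_ne_nil (ft : List Int) (h : ft.sum ≠ 0) : aliveIdx ft ≠ [] := by
  obtain ⟨c, hc, hnz⟩ := exists_nonzero_of_sum_ne_zero ft h
  exact List.ne_nil_of_mem ((mem_aliveIdx ft c).mpr ⟨hc, hnz⟩)

theorem aliveIdx_pairwise (ft : List Int) : (aliveIdx ft).Pairwise (· < ·) :=
  List.Pairwise.filter _ (List.pairwise_lt_range)

-- head/tail structure of segAlive, and nextIdx as its head ---------------------

theorem segHeadTail (ft : List Int) : ∀ (d a : Nat) (q : Nat) (tail : List Nat),
    ft.length - a ≤ d → segAlive ft a = q :: tail →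
    q < ft.length ∧ a ≤ q ∧ getI ft q ≠ 0 ∧ tail = segAlive ft (q + 1) ∧ nextIdx ft a = q := by
  intro d
  induction d with
  | zero =>
    intro a q tail hd h
    rw [segAlive_nil_of_le ft a (by omega)] at h
    exact absurd h (by simp)
  | succ d ih =>
    intro a q tail hd h
    have ha : a < ft.length := by
      by_contra hc
      rw [segAlive_nil_of_le ft a (by omega)] at h
      exact absurd h (by simp)
    rw [segAlive_cons ft a ha] at h
    by_cases h0 : getI ft a = 0
    · rw [if_pos h0] at h
      obtain ⟨hq, haq, hnz, ht, hni⟩ := ih (a + 1) q tail (by omega) h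
      refine ⟨hq, by omega, hnz, ht, ?_⟩
      have hex : ∃ c, c < ft.length ∧ getI ft c ≠ 0 := ⟨q, hq, hnz⟩
      rw [nextIdx_shift ft a ha h0 hex]
      rcases Nat.lt_or_ge (a + 1) ft.length with h1 | h1
      · rw [Nat.mod_eq_of_lt h1]; exact hni
      · exfalso
        rw [segAlive_nil_of_le ft (a + 1) h1] at h
        exact absurd h (by simp)
    · rw [if_neg h0] at h
      obtain ⟨rfl, rfl⟩ : a = q ∧ tail = segAlive ft (a + 1) := by
        constructor
        · exact (List.cons.injEq .. ▸ h).1.symm ▸ rfl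
        · exact ((List.cons.injEq ..).mp h).2.symm ▸ rfl
      exact ⟨ha, le_refl _, h0, rfl, nextIdx_self ft a ha h0⟩

theorem segAlive_drop (ft : List Int) : ∀ (L : List Nat) (a : Nat), segAlive ft a = L →
    ∀ j, j + 1 ≤ L.length → segAlive ft (L.getD j 0 + 1) = L.drop (j + 1) := by
  intro L
  induction L with
  | nil => intro a _ j hj; simp at hj
  | cons q tail ih =>
    intro a hL j hj
    obtain ⟨hq, haq, hnz, ht, hni⟩ := segHeadTail ft (ft.length - a) a q tail (le_refl _) hL
    cases j with
    | zero => simpa using ht.symm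
    | succ j =>
      have := ih (q + 1) ht.symm j (by simpa using hj)
      simpa using this

-- the eating simulation over one (partial) round -------------------------------

theorem segSim (ft' : List Int) : ∀ (m : Nat) (S : List Int) (a : Nat), 1 ≤ m →
    m ≤ (segAlive S a).length →
    simLoop S a m = (decFirst S ((segAlive S a).take m),
                     ((segAlive S a).getD (m - 1) 0 + 1) % S.length) := by
  intro m
  induction m with
  | zero => intro S a h; omega
  | succ m ih =>
    intro S a _ hm
    obtain ⟨q, tail, hL⟩ : ∃ q tail, segAlive S a = q :: tail := by
      rcases hE : segAlive S a with _ | ⟨q, tail⟩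
      · rw [hE] at hm; simp at hm
      · exact ⟨q, tail, rfl⟩
    obtain ⟨hq, haq, hnz, ht, hni⟩ := segHeadTail S (S.length - a) a q tail (le_refl _) hL
    rw [simLoop, hni, hL]
    rcases Nat.eq_zero_or_pos m with rfl | hm1
    · simp only [List.take_succ_cons, List.take_zero]
      rw [simLoop]
      rfl
    · -- m ≥ 1: recurse into the tail
      have htl : m ≤ tail.length := by rw [hL] at hm; simpa using hm
      have htne : tail ≠ [] := by
        intro hc; rw [hc] at htl; simp at htl; omega
      have hq1 : q + 1 < S.length := by
        by_contra hc
        rw [segAlive_nil_of_le S (q + 1) (by omega)] at ht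
        exact htne ht
      set S' := S.set q (getI S q - 1) with hS'
      have hseg' : segAlive S' (q + 1) = tail := by
        rw [hS', segAlive_set_lt S (q + 1) q _ (by omega), ← ht]
      have hlen' : S'.length = S.length := by simp [hS']
      have hmod : (q + 1) % S.length = q + 1 := Nat.mod_eq_of_lt hq1
      rw [hmod]
      have := ih S' (q + 1) hm1 (by rw [hseg']; exact htl)
      rw [hseg', hlen'] at this
      rw [this]
      have h1 : decFirst S (List.take (m + 1) (q :: tail)) = decFirst S' (List.take m tail) := by
        rw [List.take_succ_cons, decFirst_cons]
      have h2 : (q :: tail).getD (m + 1 - 1) 0 = tail.getD (m - 1) 0 := by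
        obtain ⟨m', rfl⟩ : ∃ m', m = m' + 1 := ⟨m - 1, by omega⟩
        simp
      rw [h1, h2]

-- wrap-around: starting the scan inside a fully dead suffix is like starting at 0

theorem distAux_dead_suffix (ft : List Int) : ∀ (t f a : Nat), a + (t + 1) = ft.length →
    (∀ i, a ≤ i → i < ft.length → getI ft i = 0) →
    distAux ft (f + (t + 1)) a = (t + 1) + distAux ft f 0 := by
  intro t
  induction t with
  | zero =>
    intro f a ha hdead
    have h0 : getI ft a = 0 := hdead a (le_refl _) (by omega)
    have : f + (0 + 1) = f + 1 := by omega
    rw [this, distAux]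
    rw [if_neg (by simpa using h0)]
    have : (a + 1) % ft.length = 0 := by
      have : a + 1 = ft.length := by omega
      rw [this, Nat.mod_self]
    rw [this]
    omega
  | succ t ih =>
    intro f a ha hdead
    have h0 : getI ft a = 0 := hdead a (le_refl _) (by omega)
    have h1 : f + (t + 1 + 1) = (f + (t + 1)) + 1 := by omega
    rw [h1, distAux, if_neg (by simpa using h0)]
    have hmod : (a + 1) % ft.length = a + 1 := Nat.mod_eq_of_lt (by omega)
    rw [hmod, ih f (a + 1) (by omega) (fun i h1 h2 => hdead i (by omega) h2)]
    omega

theorem wrapNext (ft : List Int) (a : Nat) (ha : a < ft.length)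
    (hdead : ∀ i, a ≤ i → i < ft.length → getI ft i = 0)
    (hex : ∃ c, c < ft.length ∧ getI ft c ≠ 0) :
    nextIdx ft a = nextIdx ft 0 := by
  rcases Nat.eq_zero_or_pos a with rfl | ha0
  · rfl
  obtain ⟨c, hc, hcnz⟩ := hex
  have hca : c < a := by
    by_contra hcc
    exact hcnz (hdead c (by omega) hc)
  have hsplit : ft.length = a + ((ft.length - a - 1) + 1) := by omega
  have hd := distAux_dead_suffix ft (ft.length - a - 1) a a (by omega) hdead
  have hcongr : distAux ft a 0 = distAux ft ft.length 0 := by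
    apply distAux_congr ft a ft.length 0 (by omega)
    exact ⟨c, hca, hc, by rw [Nat.zero_add, Nat.mod_eq_of_lt hc]; exact hcnz⟩
  rw [nextIdx, nextIdx, cdist, cdist]
  have hL : distAux ft ft.length a = (ft.length - a - 1 + 1) + distAux ft a 0 := by
    have h2 : ft.length = a + (ft.length - a - 1 + 1) := by omega
    calc distAux ft ft.length a = distAux ft (a + (ft.length - a - 1 + 1)) a := by rw [← h2]
      _ = (ft.length - a - 1 + 1) + distAux ft a 0 :=
          distAux_dead_suffix ft (ft.length - a - 1) a a (by omega) hdead
  rw [hL, hcongr]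
  have : a + ((ft.length - a - 1 + 1) + distAux ft ft.length 0)
       = ft.length + distAux ft ft.length 0 := by omega
  rw [this, Nat.add_mod_left, Nat.zero_add]

theorem simShift (ft : List Int) (a m : Nat) (hm : 1 ≤ m) (ha : a < ft.length)
    (hdead : ∀ i, a ≤ i → i < ft.length → getI ft i = 0)
    (hex : ∃ c, c < ft.length ∧ getI ft c ≠ 0) :
    simLoop ft a m = simLoop ft 0 m := by
  obtain ⟨m', rfl⟩ : ∃ m', m = m' + 1 := ⟨m - 1, by omega⟩
  rw [simLoop, simLoop, wrapNext ft a ha hdead hex]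

-- elements of aliveIdx are below its last element; any alive index is in aliveIdx

theorem aliveIdx_getD_lt (ft : List Int) (i j : Nat) (hi : i < (aliveIdx ft).length)
    (hj : j < (aliveIdx ft).length) (hij : i < j) :
    (aliveIdx ft).getD i 0 < (aliveIdx ft).getD j 0 := by
  have hp := aliveIdx_pairwise ft
  rw [List.pairwise_iff_getElem] at hp
  rw [List.getD_eq_getElem _ 0 hi, List.getD_eq_getElem _ 0 hj]
  exact hp i j hi hj hij

theorem aliveIdx_getD_mem (ft : List Int) (i : Nat) (hi : i < (aliveIdx ft).length) :
    (aliveIdx ft).getD i 0 ∈ aliveIdx ft := by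
  rw [List.getD_eq_getElem _ 0 hi]
  exact List.getElem_mem hi

-- the segment lemma: what A's loop does from pointer a to the end of the list --

theorem zswap : ∀ (d : Nat) (ft : List Int) (k : Int) (a r : Nat), k ≠ 0 → a < ft.length →
    getI ft a = 0 → (∃ c, c < ft.length ∧ getI ft c ≠ 0) →
    cdist ft ((a + 1) % ft.length) = d →
    (CC ft k a r ↔ CC ft k ((a + 1) % ft.length) r) := by
  intro d
  induction d using Nat.strong_induction_on with
  | _ d ih =>
    intro ft k a r hk ha h0 hex hd
    have hn : 0 < ft.length := lt_of_le_of_lt (Nat.zero_le a) ha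
    have hft : stepFt ft a = ft := by simp [stepFt, h0]
    have hkk : stepK ft k a = k := by simp [stepK, h0]
    have ha1 : (a + 1) % ft.length < ft.length := Nat.mod_lt _ hn
    have hstep := CC_step ft k a r hk
    rw [hft, hkk] at hstep
    by_cases h1 : getI ft ((a + 1) % ft.length) = 0
    · have hp : stepPtr ft a = ((a + 1) % ft.length + 1) % ft.length := by
        simp [stepPtr, hft, h1]
      rw [hp] at hstep
      have hsh : cdist ft ((a + 1) % ft.length) =
          cdist ft (((a + 1) % ft.length + 1) % ft.length) + 1 :=
        cdist_shift ft _ ha1 h1 hex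
      have ihh := ih (cdist ft (((a + 1) % ft.length + 1) % ft.length)) (by omega)
        ft k ((a + 1) % ft.length) r hk ha1 h1 hex rfl
      rw [hstep, ihh]
    · have hp : stepPtr ft a = (a + 1) % ft.length := by
        simp [stepPtr, hft, h1]
      rw [hp] at hstep
      exact hstep

theorem loopS_total : ∀ (f : Nat) (ft : List Int) (k : Int) (a : Nat),
    0 ≤ k → (k ≠ 0 → k < ft.sum) → a < ft.length →
    k.toNat * (ft.length + 1) + cdist ft a < f →
    ∃ r, loopS ft k a f = some r := by
  intro f
  induction f with
  | zero => intro ft k a _ _ _ h; omega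
  | succ f ih =>
    intro ft k a hk0 hks ha hm
    rw [loopS]
    by_cases hk : k = 0
    · exact ⟨a, by simp [hk]⟩
    simp only [hk, if_false]
    have hn : 0 < ft.length := lt_of_le_of_lt (Nat.zero_le a) ha
    have hsum := hks hk
    have hk1 : 1 ≤ k := by omega
    have hptr : stepPtr ft a < ft.length := by
      unfold stepPtr
      split <;> exact Nat.mod_lt _ hn
    by_cases h0 : getI ft a = 0
    · have hft : stepFt ft a = ft := by simp [stepFt, h0]
      have hkk : stepK ft k a = k := by simp [stepK, h0]
      have hex : ∃ c, c < ft.length ∧ getI ft c ≠ 0 :=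
        exists_nonzero_of_sum_ne_zero ft (by omega)
      have hsh : cdist ft a = cdist ft ((a + 1) % ft.length) + 1 :=
        cdist_shift ft a ha h0 hex
      have ha1 : (a + 1) % ft.length < ft.length := Nat.mod_lt _ hn
      by_cases h1 : getI ft ((a + 1) % ft.length) = 0
      · have hp : stepPtr ft a = ((a + 1) % ft.length + 1) % ft.length := by
          simp [stepPtr, hft, h1]
        have hsh2 : cdist ft ((a + 1) % ft.length) =
            cdist ft (((a + 1) % ft.length + 1) % ft.length) + 1 :=
          cdist_shift ft _ ha1 h1 hex
        rw [hft, hkk, hp]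
        exact ih ft k _ hk0 hks (Nat.mod_lt _ hn) (by omega)
      · have hp : stepPtr ft a = (a + 1) % ft.length := by
          simp [stepPtr, hft, h1]
        rw [hft, hkk, hp]
        exact ih ft k _ hk0 hks ha1 (by omega)
    · have hft : stepFt ft a = ft.set a (getI ft a - 1) := by simp [stepFt, h0]
      have hkk : stepK ft k a = k - 1 := by simp [stepK, h0]
      have hlen : (stepFt ft a).length = ft.length := length_stepFt ft a
      have hsum1 : (stepFt ft a).sum = ft.sum - 1 := by
        rw [hft, sum_set_getI ft a _ ha]; ring
      refine ih (stepFt ft a) (stepK ft k a) (stepPtr ft a) (by rw [hkk]; omega) ?_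
        (by rw [hlen]; exact hptr) ?_
      · intro hne
        rw [hkk, hsum1]
        rw [hkk] at hne
        omega
      · have hcle : cdist (stepFt ft a) (stepPtr ft a) ≤ ft.length := by
          have := cdist_le (stepFt ft a) (stepPtr ft a)
          omega
        rw [hkk, hlen]
        have ht : (k - 1).toNat = k.toNat - 1 := by omega
        rw [ht]
        obtain ⟨K', hK⟩ : ∃ K', k.toNat = K' + 1 := ⟨k.toNat - 1, by omega⟩
        rw [hK] at hm ⊢
        have hex : (K' + 1) * (ft.length + 1) = K' * (ft.length + 1) + (ft.length + 1) := by ring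
        rw [hex] at hm
        simp only [Nat.add_sub_cancel]
        omega

theorem seg : ∀ (m : Nat) (ft : List Int) (k : Int) (a : Nat),
    a < ft.length → ft.length - a ≤ m → 1 ≤ k → k < ft.sum →
    ((k ≤ ((segAlive ft a).length : Int) →
       CC ft k a (finishB (decFirst ft ((segAlive ft a).take k.toNat))
                          ((segAlive ft a).getD (k.toNat - 1) 0))) ∧
     (((segAlive ft a).length : Int) < k → ∀ r,
       CC (decFirst ft (segAlive ft a)) (k - (segAlive ft a).length) 0 r → CC ft k a r)) := by
  intro m
  induction m with
  | zero => intro ft k a ha hm _ _; omega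
  | succ m ih =>
    intro ft k a ha hm hk1 hks
    have hn : 0 < ft.length := by omega
    have hk : k ≠ 0 := by omega
    have hstep := fun r => CC_step ft k a r hk
    by_cases h0 : getI ft a = 0
    · -- no bite at a
      have hft : stepFt ft a = ft := by simp [stepFt, h0]
      have hkk : stepK ft k a = k := by simp [stepK, h0]
      have hLrw : segAlive ft a = segAlive ft (a + 1) := by
        rw [segAlive_cons ft a ha, if_pos h0]
      by_cases hano : a + 1 < ft.length
      · have hmod : (a + 1) % ft.length = a + 1 := Nat.mod_eq_of_lt hano
        by_cases h1 : getI ft (a + 1) = 0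
        · have hLrw2 : segAlive ft (a + 1) = segAlive ft (a + 2) := by
            rw [segAlive_cons ft (a + 1) hano, if_pos h1]
          by_cases hano2 : a + 2 < ft.length
          · have hp : stepPtr ft a = a + 2 := by
              simp [stepPtr, hft, hmod, h1, Nat.mod_eq_of_lt hano2]
            have hIH := ih ft k (a + 2) hano2 (by omega) hk1 hks
            rw [hLrw, hLrw2]
            constructor
            · intro hle
              refine (hstep _).mpr ?_
              rw [hft, hkk, hp]
              exact hIH.1 hle
            · intro hlt r hr
              refine (hstep _).mpr ?_
              rw [hft, hkk, hp]
              exact hIH.2 hlt r hr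
          · have ha2 : a + 2 = ft.length := by omega
            have h02 : (a + 1 + 1) % ft.length = 0 := by
              have : a + 1 + 1 = ft.length := by omega
              rw [this, Nat.mod_self]
            have hp : stepPtr ft a = 0 := by
              simp [stepPtr, hft, hmod, h1, h02]
            have hL2 : segAlive ft (a + 2) = [] := by
              rw [ha2]; exact segAlive_nil ft
            rw [hLrw, hLrw2, hL2]
            constructor
            · intro hle; simp at hle; omega
            · intro _ r hr
              refine (hstep _).mpr ?_
              rw [hft, hkk, hp]
              simpa [decFirst] using hr
        · have hp : stepPtr ft a = a + 1 := by simp [stepPtr, hft, hmod, h1]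
          have hIH := ih ft k (a + 1) hano (by omega) hk1 hks
          rw [hLrw]
          constructor
          · intro hle
            refine (hstep _).mpr ?_
            rw [hft, hkk, hp]
            exact hIH.1 hle
          · intro hlt r hr
            refine (hstep _).mpr ?_
            rw [hft, hkk, hp]
            exact hIH.2 hlt r hr
      · have ha1 : a + 1 = ft.length := by omega
        have hmod : (a + 1) % ft.length = 0 := by rw [ha1, Nat.mod_self]
        have hL1 : segAlive ft (a + 1) = [] := by rw [ha1]; exact segAlive_nil ft
        rw [hLrw, hL1]
        constructor
        · intro hle; simp at hle; omega
        · intro _ r hr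
          have hr' : CC ft k 0 r := by simpa [decFirst] using hr
          refine (hstep _).mpr ?_
          rw [hft, hkk]
          by_cases hz : getI ft 0 = 0
          · have hp : stepPtr ft a = 1 % ft.length := by
              simp [stepPtr, hft, hmod, hz]
            rw [hp]
            have hex : ∃ c, c < ft.length ∧ getI ft c ≠ 0 :=
              exists_nonzero_of_sum_ne_zero ft (by omega)
            have hzs := zswap (cdist ft ((0 + 1) % ft.length)) ft k 0 r hk hn hz hex rfl
            simpa using hzs.mp hr'
          · have hp : stepPtr ft a = 0 := by simp [stepPtr, hft, hmod, hz]
            rw [hp]; exact hr'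
    · -- bite at a
      have hft : stepFt ft a = ft.set a (getI ft a - 1) := by simp [stepFt, h0]
      have hkk : stepK ft k a = k - 1 := by simp [stepK, h0]
      have hlen1 : (ft.set a (getI ft a - 1)).length = ft.length := by simp
      have hsum1 : (ft.set a (getI ft a - 1)).sum = ft.sum - 1 := by
        rw [sum_set_getI ft a _ ha]; ring
      have hLrw : segAlive ft a = a :: segAlive ft (a + 1) := by
        rw [segAlive_cons ft a ha, if_neg h0]
      have hdfa : decFirst ft [a] = ft.set a (getI ft a - 1) := rfl
      by_cases hketa : k = 1
      · have hto : k.toNat = 1 := by rw [hketa]; rfl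
        rw [hLrw]
        constructor
        · intro _
          have htake : (a :: segAlive ft (a + 1)).take k.toNat = [a] := by simp [hto]
          have hgd : (a :: segAlive ft (a + 1)).getD (k.toNat - 1) 0 = a := by rw [hto]; rfl
          have hfin : finishB (ft.set a (getI ft a - 1)) a = stepPtr ft a := by
            simp [finishB, stepPtr, hft, getI]
          rw [htake, hgd, hdfa, hfin]
          refine (hstep _).mpr ?_
          have hk0' : k - 1 = 0 := by omega
          rw [hft, hkk, hk0']
          exact CC_zero _ _
        · intro hlt; exfalso; simp at hlt; omega
      · have hk2 : 2 ≤ k := by omega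
        have hk1' : 1 ≤ k - 1 := by omega
        have hks1 : k - 1 < (ft.set a (getI ft a - 1)).sum := by rw [hsum1]; omega
        by_cases hano : a + 1 < ft.length
        · have hmod : (a + 1) % ft.length = a + 1 := Nat.mod_eq_of_lt hano
          by_cases h1 : getI (ft.set a (getI ft a - 1)) (a + 1) = 0
          · have h1' : getI ft (a + 1) = 0 := by
              rw [← getI_set_ne ft a (a + 1) (getI ft a - 1) (by omega)]; exact h1
            have hLrw2 : segAlive ft (a + 1) = segAlive ft (a + 2) := by
              rw [segAlive_cons ft (a + 1) hano, if_pos h1']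
            by_cases hano2 : a + 2 < ft.length
            · have hp : stepPtr ft a = a + 2 := by
                simp [stepPtr, hft, hmod, h1, Nat.mod_eq_of_lt hano2]
              have hIH := ih (ft.set a (getI ft a - 1)) (k - 1) (a + 2)
                (by rw [hlen1]; exact hano2) (by rw [hlen1]; omega) hk1' hks1
              have hsg : segAlive (ft.set a (getI ft a - 1)) (a + 2) = segAlive ft (a + 2) :=
                segAlive_set_lt ft (a + 2) a _ (by omega)
              rw [hsg] at hIH
              rw [hLrw, hLrw2]
              constructor
              · intro hle
                have hleT : k - 1 ≤ ((segAlive ft (a + 2)).length : Int) := by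
                  simp at hle; omega
                have hP := hIH.1 hleT
                have htake : (a :: segAlive ft (a + 2)).take k.toNat
                    = a :: (segAlive ft (a + 2)).take ((k - 1).toNat) := by
                  have hsucc : k.toNat = (k - 1).toNat + 1 := by omega
                  rw [hsucc, List.take_succ_cons]
                have hgd : (a :: segAlive ft (a + 2)).getD (k.toNat - 1) 0
                    = (segAlive ft (a + 2)).getD ((k - 1).toNat - 1) 0 := by
                  have h1n : k.toNat - 1 = ((k - 1).toNat - 1) + 1 := by omega
                  rw [h1n, List.getD_cons_succ]
                rw [htake, hgd, decFirst_cons]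
                refine (hstep _).mpr ?_
                rw [hft, hkk, hp]
                exact hP
              · intro hlt r hr
                have hltT : ((segAlive ft (a + 2)).length : Int) < k - 1 := by
                  simp at hlt; omega
                refine (hstep _).mpr ?_
                rw [hft, hkk, hp]
                apply hIH.2 hltT r
                rw [decFirst_cons] at hr
                have he : k - ((a :: segAlive ft (a + 2)).length : Int)
                    = k - 1 - (segAlive ft (a + 2)).length := by
                  push_cast [List.length_cons]; ring
                rw [he] at hr
                exact hr
            · have ha2 : a + 2 = ft.length := by omega
              have h02 : (a + 1 + 1) % ft.length = 0 := by
                have : a + 1 + 1 = ft.length := by omega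
                rw [this, Nat.mod_self]
              have hp : stepPtr ft a = 0 := by
                simp [stepPtr, hft, hmod, h1, h02]
              have hL2 : segAlive ft (a + 2) = [] := by rw [ha2]; exact segAlive_nil ft
              rw [hLrw, hLrw2, hL2]
              constructor
              · intro hle; exfalso; simp at hle; omega
              · intro _ r hr
                refine (hstep _).mpr ?_
                rw [hft, hkk, hp]
                rw [decFirst_cons] at hr
                have he : k - (([a] : List Nat).length : Int) = k - 1 := by simp
                simpa [decFirst, he] using hr
          · have hp : stepPtr ft a = a + 1 := by simp [stepPtr, hft, hmod, h1]
            have hIH := ih (ft.set a (getI ft a - 1)) (k - 1) (a + 1)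
              (by rw [hlen1]; exact hano) (by rw [hlen1]; omega) hk1' hks1
            have hsg : segAlive (ft.set a (getI ft a - 1)) (a + 1) = segAlive ft (a + 1) :=
              segAlive_set_lt ft (a + 1) a _ (by omega)
            rw [hsg] at hIH
            rw [hLrw]
            constructor
            · intro hle
              have hleT : k - 1 ≤ ((segAlive ft (a + 1)).length : Int) := by
                simp at hle; omega
              have hP := hIH.1 hleT
              have htake : (a :: segAlive ft (a + 1)).take k.toNat
                  = a :: (segAlive ft (a + 1)).take ((k - 1).toNat) := by
                have hsucc : k.toNat = (k - 1).toNat + 1 := by omega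
                rw [hsucc, List.take_succ_cons]
              have hgd : (a :: segAlive ft (a + 1)).getD (k.toNat - 1) 0
                  = (segAlive ft (a + 1)).getD ((k - 1).toNat - 1) 0 := by
                have h1n : k.toNat - 1 = ((k - 1).toNat - 1) + 1 := by omega
                rw [h1n, List.getD_cons_succ]
              rw [htake, hgd, decFirst_cons]
              refine (hstep _).mpr ?_
              rw [hft, hkk, hp]
              exact hP
            · intro hlt r hr
              have hltT : ((segAlive ft (a + 1)).length : Int) < k - 1 := by
                simp at hlt; omega
              refine (hstep _).mpr ?_
              rw [hft, hkk, hp]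
              apply hIH.2 hltT r
              rw [decFirst_cons] at hr
              have he : k - ((a :: segAlive ft (a + 1)).length : Int)
                  = k - 1 - (segAlive ft (a + 1)).length := by
                push_cast [List.length_cons]; ring
              rw [he] at hr
              exact hr
        · have ha1 : a + 1 = ft.length := by omega
          have hmod : (a + 1) % ft.length = 0 := by rw [ha1, Nat.mod_self]
          have hL1 : segAlive ft (a + 1) = [] := by rw [ha1]; exact segAlive_nil ft
          rw [hLrw, hL1]
          constructor
          · intro hle; exfalso; simp at hle; omega
          · intro _ r hr
            have hr' : CC (ft.set a (getI ft a - 1)) (k - 1) 0 r := by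
              have he : k - (([a] : List Nat).length : Int) = k - 1 := by simp
              simpa [decFirst, he] using hr
            refine (hstep _).mpr ?_
            rw [hft, hkk]
            by_cases hz : getI (ft.set a (getI ft a - 1)) 0 = 0
            · have hp : stepPtr ft a = 1 % ft.length := by
                simp [stepPtr, hft, hmod, hz]
              rw [hp]
              have hex : ∃ c, c < (ft.set a (getI ft a - 1)).length ∧
                  getI (ft.set a (getI ft a - 1)) c ≠ 0 :=
                exists_nonzero_of_sum_ne_zero _ (by rw [hsum1]; omega)
              have hzs := zswap (cdist (ft.set a (getI ft a - 1)) ((0 + 1) % (ft.set a (getI ft a - 1)).length))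
                (ft.set a (getI ft a - 1)) (k - 1) 0 r (by omega) (by rw [hlen1]; exact hn) hz hex rfl
              rw [hlen1] at hzs
              have := hzs.mp hr'
              simpa using this
            · have hp : stepPtr ft a = 0 := by simp [stepPtr, hft, hmod, hz]
              rw [hp]; exact hr'

-- full-round plumbing shared by both round inductions ---------------------------

theorem loopB_mono (f f' : Nat) (hle : f ≤ f') :
    ∀ ft k r, loopB ft k f = some r → loopB ft k f' = some r := by
  induction f generalizing f' with
  | zero => intro ft k r h; simp [loopB] at h
  | succ f ih =>
    intro ft k r h
    obtain ⟨f'', rfl⟩ : ∃ f'', f' = f'' + 1 := ⟨f' - 1, by omega⟩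
    rw [loopB] at h ⊢
    by_cases hc : ((aliveIdx ft).length : Int) ≤ k
    · simp only [hc, if_true] at h ⊢
      exact ih f'' (by omega) _ _ _ h
    · simpa [hc] using h

theorem mem_le_last (ft : List Int) (x : Nat) (hx : x ∈ aliveIdx ft) :
    x ≤ (aliveIdx ft).getD ((aliveIdx ft).length - 1) 0 := by
  obtain ⟨j, hj, hxe⟩ := List.mem_iff_getElem.mp hx
  have hjD : (aliveIdx ft).getD j 0 = x := by rw [List.getD_eq_getElem _ 0 hj]; exact hxe
  rcases Nat.lt_or_ge j ((aliveIdx ft).length - 1) with h | h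
  · have := aliveIdx_getD_lt ft j ((aliveIdx ft).length - 1) hj (by omega) h
    omega
  · have hje : j = (aliveIdx ft).length - 1 := by omega
    rw [← hje, hjD]

theorem round_state (S : List Int) (hn : 0 < S.length) (hsum0 : S.sum ≠ 0) :
    simLoop S 0 (aliveIdx S).length
      = (decFirst S (aliveIdx S),
         ((aliveIdx S).getD ((aliveIdx S).length - 1) 0 + 1) % S.length) := by
  have hne : aliveIdx S ≠ [] := aliveIdx_ne_nil S hsum0
  have hal1 : 1 ≤ (aliveIdx S).length := List.length_pos_iff.mpr hne
  have hseg : segAlive S 0 = aliveIdx S := (aliveIdx_eq_segAlive S).symm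
  have h := segSim S (aliveIdx S).length S 0 hal1 (by rw [hseg])
  rw [hseg, List.take_length] at h
  exact h

theorem round_dead (S : List Int) :
    ∀ i, (aliveIdx S).getD ((aliveIdx S).length - 1) 0 + 1 ≤ i → i < S.length →
      getI (decFirst S (aliveIdx S)) i = 0 := by
  intro i hi hil
  have hnm : i ∉ aliveIdx S := by
    intro hmem
    have := mem_le_last S i hmem
    omega
  rw [getI_decFirst_not_mem S _ i hnm]
  by_contra hnz
  exact hnm ((mem_aliveIdx S i).mpr ⟨hil, hnz⟩)

-- after one full round, continuing for m2 more seconds is the same as restarting the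
-- scan pointer at 0 (the suffix after the last alive index is entirely dead)
theorem roundVal (S : List Int) (k : Int) (hk0 : 0 ≤ k) (hks : k < S.sum)
    (hkl : ((aliveIdx S).length : Int) ≤ k) :
    nextIdx (simLoop S 0 k.toNat).1 (simLoop S 0 k.toNat).2
      = nextIdx (simLoop (decFirst S (aliveIdx S)) 0 (k - (aliveIdx S).length).toNat).1
                (simLoop (decFirst S (aliveIdx S)) 0 (k - (aliveIdx S).length).toNat).2 ∧
    (1 ≤ k - (aliveIdx S).length →
      simLoop S 0 k.toNat
        = simLoop (decFirst S (aliveIdx S)) 0 (k - (aliveIdx S).length).toNat) := by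
  have hn : 0 < S.length := by
    rcases S with _ | ⟨x, xs⟩
    · exfalso; simp at hks; omega
    · simp
  have hsum0 : S.sum ≠ 0 := by omega
  set L := aliveIdx S with hL
  have hne : L ≠ [] := aliveIdx_ne_nil S hsum0
  have hal1 : 1 ≤ L.length := List.length_pos_iff.mpr hne
  set q := L.getD (L.length - 1) 0 with hq
  set T := decFirst S L with hT
  have hTlen : T.length = S.length := length_decFirst ..
  have hTsum : T.sum = S.sum - L.length :=
    sum_decFirst S L (fun i hi => ((mem_aliveIdx S i).mp hi).1)
  have hqlt : q < S.length := by
    have hmem : q ∈ L := aliveIdx_getD_mem S (L.length - 1) (by rw [← hL]; omega)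
    exact ((mem_aliveIdx S q).mp hmem).1
  have hm2 : k.toNat = L.length + (k - L.length).toNat := by omega
  have hsplit : simLoop S 0 k.toNat = simLoop T ((q + 1) % S.length) (k - L.length).toNat := by
    rw [hm2, simLoop_split, round_state S hn hsum0]
  have hexT : ∃ c, c < T.length ∧ getI T c ≠ 0 := by
    apply exists_nonzero_of_sum_ne_zero
    rw [hTsum]
    omega
  constructor
  · rcases Nat.eq_zero_or_pos (k - L.length).toNat with hz | hpos
    · rw [hsplit, hz]
      show nextIdx T ((q + 1) % S.length) = nextIdx T 0
      rcases Nat.lt_or_ge (q + 1) S.length with hlt | hge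
      · rw [Nat.mod_eq_of_lt hlt]
        apply wrapNext T (q + 1) (by rw [hTlen]; omega)
        · intro i h1 h2
          exact round_dead S i h1 (by rw [hTlen] at h2; omega)
        · exact hexT
      · have hq1 : q + 1 = S.length := by omega
        rw [hq1, Nat.mod_self]
    · have hshift : simLoop T ((q + 1) % S.length) (k - L.length).toNat
          = simLoop T 0 (k - L.length).toNat := by
        rcases Nat.lt_or_ge (q + 1) S.length with hlt | hge
        · rw [Nat.mod_eq_of_lt hlt]
          apply simShift T (q + 1) _ hpos (by rw [hTlen]; omega)
          · intro i h1 h2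
            exact round_dead S i h1 (by rw [hTlen] at h2; omega)
          · exact hexT
        · have hq1 : q + 1 = S.length := by omega
          rw [hq1, Nat.mod_self]
      rw [hsplit, hshift]
  · intro hpos
    have hpos' : 0 < (k - L.length).toNat := by omega
    have hshift : simLoop T ((q + 1) % S.length) (k - L.length).toNat
        = simLoop T 0 (k - L.length).toNat := by
      rcases Nat.lt_or_ge (q + 1) S.length with hlt | hge
      · rw [Nat.mod_eq_of_lt hlt]
        apply simShift T (q + 1) _ hpos' (by omega)
        · intro i h1 h2
          exact round_dead S i h1 (by omega)
        · exact hexT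
      · have hq1 : q + 1 = S.length := by omega
        rw [hq1, Nat.mod_self]
    rw [hsplit, hshift]

-- A's loop computes: simulate k seconds, then advance past at most one empty slot --

theorem MA : ∀ (K : Nat) (S : List Int) (k : Int), k.toNat ≤ K → 1 ≤ k → k < S.sum →
    CC S k 0 (afin (simLoop S 0 k.toNat)) := by
  intro K
  induction K with
  | zero => intro S k hK hk1 _; omega
  | succ K ih =>
    intro S k hK hk1 hks
    have hn : 0 < S.length := by
      rcases S with _ | ⟨x, xs⟩
      · exfalso; simp at hks; omega
      · simp
    have hseg := seg S.length S k 0 hn (by omega) hk1 hks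
    have hsegL : segAlive S 0 = aliveIdx S := (aliveIdx_eq_segAlive S).symm
    rw [hsegL] at hseg
    set L := aliveIdx S with hL
    by_cases hc : ((L.length : Int)) < k
    · -- full round
      have hsum0 : S.sum ≠ 0 := by omega
      have hne : L ≠ [] := aliveIdx_ne_nil S hsum0
      have hal1 : 1 ≤ L.length := List.length_pos_iff.mpr hne
      set T := decFirst S L with hT
      have hTsum : T.sum = S.sum - L.length :=
        sum_decFirst S L (fun i hi => ((mem_aliveIdx S i).mp hi).1)
      have hrv := (roundVal S k (by omega) hks (by rw [← hL]; omega)).2 (by rw [← hL]; push_cast; omega)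
      have hIH := ih T (k - L.length) (by omega) (by omega) (by rw [hTsum]; omega)
      have h2 := hseg.2 hc (afin (simLoop T 0 (k - L.length).toNat)) hIH
      rw [hrv]
      exact h2
    · -- partial round: k ≤ |alive|
      have hle : k ≤ (L.length : Int) := by omega
      have h1 := hseg.1 hle
      have hsim := segSim S k.toNat S 0 (by omega) (by rw [hsegL]; omega)
      rw [hsegL] at hsim
      rw [hsim]
      have hfin : afin (decFirst S (L.take k.toNat), (L.getD (k.toNat - 1) 0 + 1) % S.length)
          = finishB (decFirst S (L.take k.toNat)) (L.getD (k.toNat - 1) 0) := by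
        have hlen : (decFirst S (L.take k.toNat)).length = S.length := length_decFirst ..
        unfold afin finishB getI
        rw [hlen]
      rw [hfin]
      exact h1

-- B's loop computes: simulate k seconds, then take the next unfinished food --------

theorem MB : ∀ (K : Nat) (S : List Int) (k : Int), k.toNat ≤ K → 0 ≤ k → k < S.sum →
    loopB S k (k.toNat + 2)
      = some (((nextIdx (simLoop S 0 k.toNat).1 (simLoop S 0 k.toNat).2 : Nat) : Int) + 1) := by
  intro K
  induction K with
  | zero =>
    intro S k hK hk0 hks
    -- k.toNat = 0, so k = 0
    have hkz : k = 0 := by omega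
    subst hkz
    have hn : 0 < S.length := by
      rcases S with _ | ⟨x, xs⟩
      · exfalso; simp at hks
      · simp
    have hsum0 : S.sum ≠ 0 := by omega
    set L := aliveIdx S with hL
    have hne : L ≠ [] := aliveIdx_ne_nil S hsum0
    have hal1 : 1 ≤ L.length := List.length_pos_iff.mpr hne
    rw [show (0 : Int).toNat + 2 = 1 + 1 from rfl, loopB]
    rw [if_neg (by rw [hL.symm]; push_cast; omega)]
    obtain ⟨qh, tl, hcons⟩ : ∃ qh tl, L = qh :: tl := by
      rcases hE : L with _ | ⟨qh, tl⟩
      · exact absurd hE hne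
      · exact ⟨qh, tl, rfl⟩
    obtain ⟨hq, _, hnz, _, hni⟩ :=
      segHeadTail S (S.length - 0) 0 qh tl (le_refl _)
        (by rw [← aliveIdx_eq_segAlive, hL.symm]; exact hcons)
    rw [show simLoop S 0 (0 : Int).toNat = (S, 0) from rfl]
    rw [hL.symm, hcons, PySem.List.pyGet?_zero_cons]
    simp [hni]
  | succ K ih =>
    intro S k hK hk0 hks
    have hn : 0 < S.length := by
      rcases S with _ | ⟨x, xs⟩
      · exfalso; simp at hks; omega
      · simp
    have hsum0 : S.sum ≠ 0 := by omega
    set L := aliveIdx S with hL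
    have hne : L ≠ [] := aliveIdx_ne_nil S hsum0
    have hal1 : 1 ≤ L.length := List.length_pos_iff.mpr hne
    rw [show k.toNat + 2 = (k.toNat + 1) + 1 from rfl, loopB, hL.symm]
    by_cases hc : ((L.length : Int)) ≤ k
    · rw [if_pos hc]
      set T := decFirst S L with hT
      have hTsum : T.sum = S.sum - L.length :=
        sum_decFirst S L (fun i hi => ((mem_aliveIdx S i).mp hi).1)
      have hIH := ih T (k - L.length) (by omega) (by omega) (by rw [hTsum]; omega)
      have hmono := loopB_mono ((k - L.length).toNat + 2) (k.toNat + 1) (by omega) T (k - L.length) _ hIH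
      rw [hmono]
      have hrv := (roundVal S k hk0 hks hc).1
      rw [hrv]
    · rw [if_neg hc]
      have hklen : k.toNat < L.length := by omega
      have hkval : PySem.List.pyGet? L k = some (L.getD k.toNat 0) := by
        have h1 : PySem.List.pyGet? L k = L[k.toNat]? := by
          conv_lhs => rw [show k = ((k.toNat : Nat) : Int) by omega]
          rw [PySem.List.pyGet?_natCast]
        rw [h1, List.getElem?_eq_getElem hklen, List.getD_eq_getElem _ 0 hklen]
      rw [hkval]
      have hgoal : nextIdx (simLoop S 0 k.toNat).1 (simLoop S 0 k.toNat).2 = L.getD k.toNat 0 := ?_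
      · rw [hgoal]; rfl
      -- nextIdx on the simulated state is the (k+1)-st alive index
      rcases Nat.eq_zero_or_pos k.toNat with hz | hpos
      · rw [hz, show simLoop S 0 0 = (S, 0) from rfl]
        obtain ⟨qh, tl, hcons⟩ : ∃ qh tl, L = qh :: tl := by
          rcases hE : L with _ | ⟨qh, tl⟩
          · exact absurd hE hne
          · exact ⟨qh, tl, rfl⟩
        obtain ⟨_, _, _, _, hni⟩ :=
          segHeadTail S (S.length - 0) 0 qh tl (le_refl _)
            (by rw [← aliveIdx_eq_segAlive, hL.symm]; exact hcons)
        rw [hcons]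
        simp only [List.getD_cons_zero]
        exact hni
      · -- 1 ≤ k
        have hsegL : segAlive S 0 = L := (aliveIdx_eq_segAlive S).symm
        have hsim := segSim S k.toNat S 0 hpos (by rw [hsegL]; omega)
        rw [hsegL] at hsim
        rw [hsim]
        set q := L.getD (k.toNat - 1) 0 with hq
        set q' := L.getD k.toNat 0 with hq'
        set T' := decFirst S (L.take k.toNat) with hT'
        have hqq' : q < q' := aliveIdx_getD_lt S (k.toNat - 1) k.toNat
          (by rw [hL.symm]; omega) (by rw [hL.symm]; omega) (by omega)
        have hq'n : q' < S.length := by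
          have hmem : q' ∈ L := aliveIdx_getD_mem S k.toNat (by rw [hL.symm]; omega)
          exact ((mem_aliveIdx S q').mp hmem).1
        have hmod : (q + 1) % S.length = q + 1 := Nat.mod_eq_of_lt (by omega)
        have htake_lt : ∀ x ∈ L.take k.toNat, x < q + 1 := by
          intro x hx
          obtain ⟨j, hj, hxe⟩ := List.mem_iff_getElem.mp hx
          have hjlt : j < k.toNat := by
            have := hj
            simp only [List.length_take] at this
            omega
          have hjL : j < L.length := by omega
          have hxL : L.getD j 0 = x := by
            rw [List.getD_eq_getElem _ 0 hjL, ← hxe, List.getElem_take]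
          rcases Nat.lt_or_ge j (k.toNat - 1) with hjj | hjj
          · have hlt := aliveIdx_getD_lt S j (k.toNat - 1) (by rw [hL.symm]; omega)
              (by rw [hL.symm]; omega) hjj
            rw [hL.symm] at hlt
            rw [← hq] at hlt
            omega
          · have hje : j = k.toNat - 1 := by omega
            rw [hje, ← hq] at hxL
            omega
        have hseg1 : segAlive T' (q + 1) = segAlive S (q + 1) :=
          segAlive_decFirst_lt S (L.take k.toNat) (q + 1) htake_lt
        have hseg2 : segAlive S (q + 1) = L.drop k.toNat := by
          have := segAlive_drop S L 0 hsegL (k.toNat - 1) (by omega)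
          rw [← hq] at this
          rw [show k.toNat - 1 + 1 = k.toNat by omega] at this
          exact this
        have hdrop : L.drop k.toNat = q' :: L.drop (k.toNat + 1) := by
          rw [List.drop_eq_getElem_cons hklen]
          congr 1
          rw [hq', List.getD_eq_getElem _ 0 hklen]
        have hchain : segAlive T' (q + 1) = q' :: L.drop (k.toNat + 1) := by
          rw [hseg1, hseg2, hdrop]
        obtain ⟨_, _, _, _, hni⟩ :=
          segHeadTail T' (T'.length - (q + 1)) (q + 1) q' (L.drop (k.toNat + 1))
            (le_refl _) hchain
        rw [hmod]
        exact hni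

-- bridging loopA (Int pointer, PySem primitives) to loopS ---------------------

theorem loopA_eq_loopS : ∀ (fuel : Nat) (ft : List Int) (k : Int) (a : Nat),
    a < ft.length →
    loopA ft k (a : Int) fuel = (loopS ft k a fuel).map (fun x => (x : Int)) := by
  intro fuel
  induction fuel with
  | zero => intro ft k a _; rfl
  | succ fuel ih =>
    intro ft k a ha
    have hn : 0 < ft.length := by omega
    have hget : PySem.List.pyGet? ft (a : Int) = some (getI ft a) := by
      rw [PySem.List.pyGet?_natCast, List.getElem?_eq_getElem ha, getI,
          List.getD_eq_getElem ft 0 ha]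
    have hlenF : (stepFt ft a).length = ft.length := length_stepFt ft a
    have hmodc : PySem.Int.mod ((a : Int) + 1) ((stepFt ft a).length : Int)
        = (((a + 1) % ft.length : Nat) : Int) := by
      rw [hlenF]
      have h1 : ((a : Int) + 1) = ((a + 1 : Nat) : Int) := by push_cast; ring
      rw [h1, PySem.Int.mod_natCast]
    have ha1 : (a + 1) % ft.length < ft.length := Nat.mod_lt _ hn
    have hget2 : PySem.List.pyGet? (stepFt ft a) ((((a + 1) % ft.length : Nat)) : Int)
        = some (getI (stepFt ft a) ((a + 1) % ft.length)) := by
      rw [PySem.List.pyGet?_natCast,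
          List.getElem?_eq_getElem (by rw [hlenF]; exact ha1), getI,
          List.getD_eq_getElem _ 0 (by rw [hlenF]; exact ha1)]
    have hmodc2 : PySem.Int.mod ((((a + 1) % ft.length : Nat) : Int) + 1) ((stepFt ft a).length : Int)
        = ((((a + 1) % ft.length + 1) % ft.length : Nat) : Int) := by
      rw [hlenF]
      have h1 : ((((a + 1) % ft.length : Nat)) : Int) + 1
          = (((a + 1) % ft.length + 1 : Nat) : Int) := by push_cast; ring
      rw [h1, PySem.Int.mod_natCast]
    by_cases hk : k = 0
    · simp [loopA, loopS, hk]
    · rw [loopA, loopS]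
      simp only [hk, if_false, hget]
      have hftp : (if getI ft a ≠ 0 then ft.set (a : Int).toNat (getI ft a - 1) else ft)
          = stepFt ft a := by
        rw [stepFt, Int.toNat_natCast]
      have hkp : (if getI ft a ≠ 0 then k - 1 else k) = stepK ft k a := by rw [stepK]
      simp only [hftp, hkp, hmodc, hget2, hmodc2]
      have hptr : stepPtr ft a < ft.length := by
        unfold stepPtr; split <;> exact Nat.mod_lt _ hn
      by_cases hw : getI (stepFt ft a) ((a + 1) % ft.length) = 0
      · simp only [hw, if_true]
        have hp : stepPtr ft a = ((a + 1) % ft.length + 1) % ft.length := by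
          simp [stepPtr, hw]
        rw [← hp, ih (stepFt ft a) (stepK ft k a) (stepPtr ft a) (by rw [hlenF]; exact hptr)]
      · simp only [hw, if_false]
        have hp : stepPtr ft a = (a + 1) % ft.length := by
          simp [stepPtr, hw]
        rw [← hp, ih (stepFt ft a) (stepK ft k a) (stepPtr ft a) (by rw [hlenF]; exact hptr)]

-- extracting the two programs' values -------------------------------------------

theorem solA_zero (ft : List Int) (h : 0 < ft.sum) : solution ft 0 = 1 := by
  unfold solution
  rw [if_neg (by omega)]
  obtain ⟨g, hg⟩ : ∃ g, (Int.toNat 0 + 2) * (ft.length + 2) = g + 1 :=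
    ⟨(Int.toNat 0 + 2) * (ft.length + 2) - 1, by
      have hp : 0 < (Int.toNat 0 + 2) * (ft.length + 2) := by positivity
      omega⟩
  rw [hg, loopA]
  simp

theorem solA_pos (ft : List Int) (k : Int) (hk1 : 1 ≤ k) (hks : k < ft.sum) :
    solution ft k = ↑(afin (simLoop ft 0 k.toNat)) + 1 := by
  unfold solution
  rw [if_neg (by omega)]
  have hn : 0 < ft.length := by
    rcases ft with _ | ⟨x, xs⟩
    · exfalso; simp at hks; omega
    · simp
  have hCC := MA k.toNat ft k (le_refl _) hk1 hks
  have hAA : loopA ft k (0 : Int) ((k.toNat + 2) * (ft.length + 2))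
      = (loopS ft k 0 ((k.toNat + 2) * (ft.length + 2))).map (fun x => (x : Int)) := by
    have := loopA_eq_loopS ((k.toNat + 2) * (ft.length + 2)) ft k 0 hn
    simpa using this
  have hcd : cdist ft 0 ≤ ft.length := cdist_le ft 0
  have hexp : (k.toNat + 2) * (ft.length + 2)
      = k.toNat * (ft.length + 1) + k.toNat + 2 * ft.length + 4 := by ring
  obtain ⟨r', hr'⟩ := loopS_total ((k.toNat + 2) * (ft.length + 2)) ft k 0 (by omega)
    (fun _ => hks) hn (by omega)
  have hrr : r' = afin (simLoop ft 0 k.toNat) := CC_det ft k 0 r' _ ⟨_, hr'⟩ hCC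
  subst hrr
  rw [hAA, hr']
  rfl

theorem solB_val (ft : List Int) (k : Int) (hk0 : 0 ≤ k) (hks : k < ft.sum) :
    solution_alt ft k
      = ↑(nextIdx (simLoop ft 0 k.toNat).1 (simLoop ft 0 k.toNat).2) + 1 := by
  unfold solution_alt
  rw [if_neg (by omega), MB k.toNat ft k (le_refl _) hk0 hks]

-- ===== VERDICT (by name: the statement is the Claim_ definition above) =====
theorem solution_spec : Claim_unchanged_solution := by
  unfold Claim_unchanged_solution
  intro ft k _ hpre
  unfold Spec_solution
  intro hnD
  by_cases hs : ft.sum ≤ k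
  · unfold solution solution_alt
    simp [hs]
  · have hk0 : 0 ≤ k := by
      rcases hpre with h | h
      · exact h
      · exact absurd h hs
    have hks : k < ft.sum := by omega
    have hn : 0 < ft.length := by
      rcases ft with _ | ⟨x, xs⟩
      · exfalso; simp at hks; omega
      · simp
    by_cases hk : k = 0
    · subst hk
      rw [solA_zero ft (by omega), solB_val ft 0 (le_refl _) hks]
      have h00 : getI ft 0 ≠ 0 := by
        intro hz
        refine hnD ⟨hks, ?_, Or.inl rfl⟩
        rw [foldl_rot]
        obtain ⟨x, xs, hft⟩ : ∃ x xs, ft = x :: xs := by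
          rcases ft with _ | ⟨x, xs⟩
          · simp at hn
          · exact ⟨x, xs, rfl⟩
        rw [hft] at hz ⊢
        show some x = some 0
        rw [show x = getI (x :: xs) 0 from rfl, hz]
      rw [show simLoop ft 0 (0 : Int).toNat = (ft, 0) from rfl]
      rw [nextIdx_self ft 0 hn h00]
      decide
    · have hk1 : 1 ≤ k := by omega
      rw [solA_pos ft k hk1 hks, solB_val ft k hk0 hks]
      have hbA := rot_head ft k hk0 hks
      have hbB := rot_tail_head ft k hk0 hks
      have hfr := foldl_rot k.toNat ft
      set P := simLoop ft 0 k.toNat with hP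
      have hTlen : P.1.length = ft.length := simLoop_length k.toNat ft 0
      have hslt : P.2 < P.1.length := by
        rw [hTlen]; exact simLoop_snd_lt k.toNat ft 0 hn hn
      have hnd2 : ¬ (getI P.1 P.2 = 0 ∧ getI P.1 ((P.2 + 1) % ft.length) = 0) := by
        intro ⟨h1, h2⟩
        refine hnD ⟨hks, ?_, Or.inr ?_⟩
        · rw [hfr, hbA, h1]
        · rw [hfr, hbB, h2]
      congr 2
      by_cases hd1 : getI P.1 P.2 = 0
      · have hd2 : getI P.1 ((P.2 + 1) % ft.length) ≠ 0 := fun h => hnd2 ⟨hd1, h⟩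
        have hd2' : getI P.1 ((P.2 + 1) % P.1.length) ≠ 0 := by rw [hTlen]; exact hd2
        have hafin : afin P = (P.2 + 1) % P.1.length := by
          unfold afin
          rw [if_pos hd1]
        rw [hafin, nextIdx_shift P.1 P.2 hslt hd1
              ⟨(P.2 + 1) % P.1.length, Nat.mod_lt _ (by omega), hd2'⟩,
            nextIdx_self P.1 _ (Nat.mod_lt _ (by omega)) hd2']
      · have hafin : afin P = P.2 := by
          unfold afin
          rw [if_neg hd1]
        rw [hafin, nextIdx_self P.1 P.2 hslt hd1]

theorem solution_changed : Claim_changed_solution := by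
  unfold Claim_changed_solution
  decide

theorem solution_tight : Claim_exact_solution := by
  unfold Claim_exact_solution
  intro ft k _ hpre hD
  obtain ⟨hks, hd1, hdor⟩ := hD
  have hk0 : 0 ≤ k := by
    rcases hpre with h | h
    · exact h
    · omega
  have hn : 0 < ft.length := by
    rcases ft with _ | ⟨x, xs⟩
    · exfalso; simp at hks; omega
    · simp
  rw [foldl_rot] at hd1
  rw [foldl_rot] at hdor
  by_cases hkz : k = 0
  · subst hkz
    have h00 : getI ft 0 = 0 := by
      obtain ⟨x, xs, hft⟩ : ∃ x xs, ft = x :: xs := by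
        rcases ft with _ | ⟨x, xs⟩
        · simp at hn
        · exact ⟨x, xs, rfl⟩
      rw [hft] at hd1
      have hx : x = 0 := by
        have := hd1
        simp only [show rot (x :: xs) (0 : Int).toNat = x :: xs from rfl,
          List.head?_cons, Option.some.injEq] at this
        exact this
      rw [hft]
      exact hx
    rw [solA_zero ft (by omega), solB_val ft 0 (le_refl _) hks]
    have hnz : getI ft (nextIdx ft 0) ≠ 0 := by
      apply nextIdx_alive ft (cdist ft 0) 0 rfl hn
      exact exists_nonzero_of_sum_ne_zero ft (by omega)
    intro heq
    have heq' : (1 : Int) = ((nextIdx ft 0 : Nat) : Int) + 1 := heq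
    have hz : nextIdx ft 0 = 0 := by omega
    rw [hz] at hnz
    exact hnz h00
  · have hk1 : 1 ≤ k := by omega
    have hd2 := hdor.resolve_left hkz
    rw [solA_pos ft k hk1 hks, solB_val ft k hk0 hks]
    rw [rot_head ft k hk0 hks] at hd1
    rw [rot_tail_head ft k hk0 hks] at hd2
    set P := simLoop ft 0 k.toNat with hP
    have hd1' : getI P.1 P.2 = 0 := Option.some.inj hd1
    have hd2' : getI P.1 ((P.2 + 1) % ft.length) = 0 := Option.some.inj hd2
    have hTlen : P.1.length = ft.length := simLoop_length k.toNat ft 0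
    have hslt : P.2 < P.1.length := by
      rw [hTlen]; exact simLoop_snd_lt k.toNat ft 0 hn hn
    have hsum : P.1.sum = ft.sum - k := by
      have := simLoop_sum k.toNat ft 0 hn (by omega)
      rw [← hP] at this
      rw [this]
      omega
    have hnzB : getI P.1 (nextIdx P.1 P.2) ≠ 0 := by
      apply nextIdx_alive P.1 (cdist P.1 P.2) P.2 rfl hslt
      apply exists_nonzero_of_sum_ne_zero
      omega
    have hafin : afin P = (P.2 + 1) % P.1.length := by
      unfold afin
      rw [if_pos hd1']
    have hzA : getI P.1 (afin P) = 0 := by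
      rw [hafin, hTlen]
      exact hd2'
    intro heq
    have hidx : afin P = nextIdx P.1 P.2 := by omega
    rw [hidx] at hzA
    exact hnzB hzA
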